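-- pv_equiv track=rewrite | github.com/dllu/fleurdream | solver.py | generalized_levenshtein_distance
-- ===== SOURCE A (Python) =====
-- def generalized_levenshtein_distance(source: str, target: str) -> int:
--     """
--     Given strings source and target, find the minimum Levenshtein distance between any
--     substring of source and target using dynamic programming to avoid redundant computations.
--     """
--     n = len(source)
--     m = len(target)
--
--     # If target is longer than source, it's impossible to match
--     if m > n:
--         return m
--
--     # Initialize a matrix where dp[i][j] represents the Levenshtein distance
--     # between the first i characters of source and the first j characters of target
--     dp = [[0] * (m + 1) for _ in range(n + 1)]
--
--     # Source prefixes can be transformed into empty string by dropping all characters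
--     for i in range(1, n + 1):
--         dp[i][0] = 0  # Cost of dropping source characters is not counted
--
--     # Target prefixes can be reached from empty source prefix by inserting every character
--     for j in range(1, m + 1):
--         dp[0][j] = j
--
--     # Compute the distance
--     for i in range(1, n + 1):
--         for j in range(1, m + 1):
--             cost = 0 if source[i - 1] == target[j - 1] else 1
--             dp[i][j] = min(
--                 dp[i - 1][j] + 1,  # Deletion
--                 dp[i][j - 1] + 1,  # Insertion
--                 dp[i - 1][j - 1] + cost,  # Substitution
--             )
--
--     # Find the minimum distance in the last column
--     min_distance = min(dp[i][m] for i in range(1, n + 1))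
--
--     return min_distance
-- ===== SOURCE B (Python) =====
-- def generalized_levenshtein_distance(source: str, target: str) -> int:
--     """Top-down memoized recursion over the prefix-pair recurrence, instead of
--     filling an explicit (n+1)x(m+1) table; a chunked cache-warming pass keeps the
--     recursion depth bounded regardless of input size."""
--     n = len(source)
--     m = len(target)
--     if m > n:
--         return m
--
--     w = m + 1
--     memo = {}
--
--     def f(i: int, j: int) -> int:
--         # edit distance between source[:i] and target[:j], with deletion of a
--         # source prefix free (f(i, 0) = 0 for every i)
--         key = i * w + j
--         v = memo.get(key)
--         if v is not None:
--             return v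
--         if j == 0:
--             v = 0
--         elif i == 0:
--             v = j
--         else:
--             cost = 0 if source[i - 1] == target[j - 1] else 1
--             v = min(f(i - 1, j) + 1, f(i, j - 1) + 1, f(i - 1, j - 1) + cost)
--         memo[key] = v
--         return v
--
--     # Warm the cache one column-block at a time so that no call recurses deeper
--     # than CHUNK + O(1) frames (pure optimisation: returned values are unchanged).
--     CHUNK = 256
--     for jb in range(CHUNK, m + 1, CHUNK):
--         for i in range(1, n + 1):
--             f(i, jb)
--
--     return min(f(i, m) for i in range(1, n + 1))
-- ===== Notes on version B (the rewrite author's own statement) =====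
-- stated objective: alternative
-- what changed: B replaces A's bottom-up table fill (preallocated (n+1)x(m+1) matrix, two init loops, nested fill loops, final column scan) by a top-down memoized recursion f(i,j) over the prefix-pair recurrence, with a chunked cache-warming loop that bounds the recursion depth; the answer is min(f(i,m)).
import Mathlib
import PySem

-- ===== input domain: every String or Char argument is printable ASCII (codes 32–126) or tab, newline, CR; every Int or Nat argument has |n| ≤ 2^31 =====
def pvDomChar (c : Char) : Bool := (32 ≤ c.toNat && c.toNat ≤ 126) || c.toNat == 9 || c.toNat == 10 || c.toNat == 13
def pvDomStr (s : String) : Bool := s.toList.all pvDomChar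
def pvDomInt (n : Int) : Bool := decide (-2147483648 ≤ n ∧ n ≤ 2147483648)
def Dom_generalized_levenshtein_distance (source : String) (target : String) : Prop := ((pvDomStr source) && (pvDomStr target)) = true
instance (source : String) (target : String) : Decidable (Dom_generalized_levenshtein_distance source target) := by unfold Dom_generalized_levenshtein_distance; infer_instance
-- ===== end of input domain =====

-- B replaces A's bottom-up table fill by a top-down memoized recursion over the same
-- prefix-pair recurrence (alternative decomposition; the Python memo/cache-warming is a
-- pure optimisation with no observable effect, so B's port is the plain recursion).


-- ===== PORT A =====
-- dp[i][0] = 0 (Python writes 0 over the initial 0)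
def pvAzeroCol (dp : List (List Int)) (i : Nat) : List (List Int) :=
  dp.set i ((dp.getD i []).set 0 0)

-- dp[0][j] = j
def pvAtopRow (dp : List (List Int)) (j : Nat) : List (List Int) :=
  dp.set 0 ((dp.getD 0 []).set j (j : Int))

-- body of the double loop; every index is in range in A, so getD is exact there
def pvAcell (s t : List Char) (dp : List (List Int)) (i j : Nat) : List (List Int) :=
  let cost : Int := if s.getD (i-1) ' ' = t.getD (j-1) ' ' then 0 else 1
  let v := min (min ((dp.getD (i-1) []).getD j 0 + 1)
                    ((dp.getD i []).getD (j-1) 0 + 1))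
               ((dp.getD (i-1) []).getD (j-1) 0 + cost)
  dp.set i ((dp.getD i []).set j v)

def pvArow (s t : List Char) (dp : List (List Int)) (i : Nat) : List (List Int) :=
  (List.range' 1 t.length).foldl (fun dp j => pvAcell s t dp i j) dp

def pvAtable (s t : List Char) : List (List Int) :=
  (List.range' 1 s.length).foldl (fun dp i => pvArow s t dp i)
    ((List.range' 1 t.length).foldl pvAtopRow
      ((List.range' 1 s.length).foldl pvAzeroCol
        ((List.range (s.length+1)).map (fun _ => List.replicate (t.length+1) (0:Int)))))

-- Python min(iterable), shared by both ports; [] is where Python raises ValueError (excluded by Pre_)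
def pvPyMin : List Int → Int
  | [] => 0
  | v :: rest => rest.foldl min v

def generalized_levenshtein_distance (source : String) (target : String) : Int :=
  if target.toList.length > source.toList.length then (target.toList.length : Int)
  else pvPyMin ((List.range' 1 source.toList.length).map
    (fun i => ((pvAtable source.toList target.toList).getD i []).getD target.toList.length 0))

-- ===== PORT B =====
-- Source B's f(i, j): same branches in the same order (j == 0, i == 0, else the
-- three-way min); the memo dict and the cache-warming loop only re-deliver these
-- same values, so in the pure port f is the bare recursion. Indices i-1/j-1 are
-- always in range where f dereferences the strings; getD's default is never hit.
def pvBf (s t : List Char) : Nat → Nat → Int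
  | _, 0 => 0
  | 0, j+1 => (j : Int) + 1
  | i+1, j+1 =>
      min (min (pvBf s t i (j+1) + 1) (pvBf s t (i+1) j + 1))
          (pvBf s t i j + (if s.getD i ' ' = t.getD j ' ' then 0 else 1))
  termination_by i j => (i, j)

def generalized_levenshtein_distance_alt (source : String) (target : String) : Int :=
  if target.toList.length > source.toList.length then (target.toList.length : Int)
  else pvPyMin ((List.range' 1 source.toList.length).map
    (fun i => pvBf source.toList target.toList i target.toList.length))

-- ===== PRECONDITION & SPEC =====
-- Pre_ excludes only source = "" = target, where Python A (and B) raise ValueError: min() of an empty sequence.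
def Pre_generalized_levenshtein_distance (source : String) (target : String) : Prop :=
  ¬ (source = "" ∧ target = "")
instance (source : String) (target : String) : Decidable (Pre_generalized_levenshtein_distance source target) := by unfold Pre_generalized_levenshtein_distance; infer_instance

def pvWitness_generalized_levenshtein_distance : String × String := ("ab", "b")

def Spec_generalized_levenshtein_distance (source : String) (target : String) (out : Int) : Prop := out = generalized_levenshtein_distance_alt source target
instance (source : String) (target : String) (out : Int) : Decidable (Spec_generalized_levenshtein_distance source target out) := by unfold Spec_generalized_levenshtein_distance; infer_instance

-- ===== CLAIM (what is proved, stated in full; the proofs are below) =====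
def Claim_equal_generalized_levenshtein_distance : Prop := ∀ (source : String) (target : String), Dom_generalized_levenshtein_distance source target → Pre_generalized_levenshtein_distance source target → Spec_generalized_levenshtein_distance source target (generalized_levenshtein_distance source target)

-- ===== LEMMAS AND PROOFS =====

lemma pvBf_zero_right (s t : List Char) (i : Nat) : pvBf s t i 0 = 0 := by
  cases i <;> simp [pvBf]

lemma pvBf_zero_left (s t : List Char) (j : Nat) : pvBf s t 0 (j+1) = (j : Int) + 1 := by
  simp [pvBf]

lemma pvBf_succ (s t : List Char) (i j : Nat) :
    pvBf s t (i+1) (j+1) =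
      min (min (pvBf s t i (j+1) + 1) (pvBf s t (i+1) j + 1))
          (pvBf s t i j + (if s.getD i ' ' = t.getD j ' ' then 0 else 1)) := by
  simp [pvBf]

lemma getD_map_range {α : Type} (g : Nat → α) {k i : Nat} (d : α) (h : i < k) :
    ((List.range k).map g).getD i d = g i := by
  simp [List.getD_eq_getElem?_getD, List.getElem?_map, List.getElem?_range h]

lemma map_range_set {α : Type} (g : Nat → α) (k i : Nat) (a : α) :
    ((List.range k).map g).set i a = (List.range k).map (fun x => if x = i then a else g x) := by
  apply List.ext_getElem?
  intro j
  by_cases hj : j < k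
  · rw [List.getElem?_set]
    simp only [List.getElem?_map, List.getElem?_range hj, Option.map_some, List.length_map,
      List.length_range]
    by_cases hij : i = j
    · subst hij
      simp [hj]
    · simp [hij, Ne.symm hij]
  · have hj' : k ≤ j := Nat.le_of_not_lt hj
    have h1 : (((List.range k).map g).set i a)[j]? = none := by
      apply List.getElem?_eq_none
      simpa using hj'
    have h2 : (((List.range k).map (fun x => if x = i then a else g x)))[j]? = none := by
      apply List.getElem?_eq_none
      simpa using hj'
    rw [h1, h2]

lemma range1_concat (k : Nat) : List.range' 1 (k+1) = List.range' 1 k ++ [k+1] := by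
  have h := List.range'_concat (s := 1) (n := k) (step := 1)
  simpa [Nat.one_mul, Nat.add_comm] using h

lemma foldl_inv {σ : Type} (P : Nat → σ → Prop) (f : σ → Nat → σ) (a : σ) :
    ∀ k : Nat, (∀ i x, i < k → P i x → P (i+1) (f x (i+1))) → P 0 a →
      P k ((List.range' 1 k).foldl f a) := by
  intro k
  induction k with
  | zero => intro _ h0; simpa using h0
  | succ k ih =>
    intro hs h0
    rw [range1_concat, List.foldl_append, List.foldl_cons, List.foldl_nil]
    exact hs k _ (Nat.lt_succ_self k) (ih (fun i x hi hx => hs i x (Nat.lt_succ_of_lt hi) hx) h0)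

lemma map_range_const (k : Nat) (c : Int) :
    (List.range k).map (fun _ => c) = List.replicate k c := by
  induction k with
  | zero => simp
  | succ k ih => rw [List.range_succ, List.map_append, ih, List.replicate_succ']; simp

-- row i of the reference table
def rowD (s t : List Char) (i : Nat) : List Int := (List.range (t.length+1)).map (pvBf s t i)

-- row 0 after the second init loop has reached j
def colRow (m j : Nat) : List Int := (List.range (m+1)).map (fun j' => if j' ≤ j then (j' : Int) else 0)

-- row i of the table while its inner loop has reached j
def partRow (s t : List Char) (i j : Nat) : List Int :=
  (List.range (t.length+1)).map (fun j' => if j' ≤ j then pvBf s t i j' else 0)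

lemma colRow_set (m j : Nat) (_hj : j < m) :
    (colRow m j).set (j+1) ((j+1 : Nat) : Int) = colRow m (j+1) := by
  unfold colRow
  rw [map_range_set]
  apply List.map_congr_left
  intro a ha
  rw [List.mem_range] at ha
  by_cases h1 : a = j+1
  · subst h1; simp
  · simp only [if_neg h1]
    split_ifs <;> omega

lemma partRow_set (s t : List Char) (i j : Nat) (_hj : j < t.length) :
    (partRow s t i j).set (j+1) (pvBf s t i (j+1)) = partRow s t i (j+1) := by
  unfold partRow
  rw [map_range_set]
  apply List.map_congr_left
  intro a ha
  rw [List.mem_range] at ha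
  by_cases h1 : a = j+1
  · subst h1; simp
  · simp only [if_neg h1]
    split_ifs <;> first | rfl | omega

lemma partRow_getD (s t : List Char) (i j j' : Nat) (h : j' ≤ j) (h2 : j' < t.length+1) :
    (partRow s t i j).getD j' 0 = pvBf s t i j' := by
  unfold partRow
  rw [getD_map_range _ _ h2]
  simp [h]

lemma rowD_getD (s t : List Char) (i j : Nat) (h : j < t.length+1) :
    (rowD s t i).getD j 0 = pvBf s t i j := by
  unfold rowD
  rw [getD_map_range _ _ h]

lemma partRow_zero (s t : List Char) (i : Nat) :
    partRow s t i 0 = List.replicate (t.length+1) (0:Int) := by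
  unfold partRow
  rw [show (fun j' : Nat => if j' ≤ 0 then pvBf s t i j' else 0) = (fun _ : Nat => (0:Int)) from
    funext (fun j' => by cases j' <;> simp [pvBf_zero_right]), map_range_const]

lemma partRow_full (s t : List Char) (i : Nat) : partRow s t i t.length = rowD s t i := by
  unfold partRow rowD
  apply List.map_congr_left
  intro a ha
  rw [List.mem_range] at ha
  rw [if_pos (by omega)]

lemma A_table (s t : List Char) :
    pvAtable s t = (List.range (s.length+1)).map (rowD s t) := by
  unfold pvAtable
  -- step 1: the dp[i][0] = 0 loop rewrites 0 over 0 and is the identity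
  have h1 : (List.range' 1 s.length).foldl pvAzeroCol
      ((List.range (s.length+1)).map (fun _ => List.replicate (t.length+1) (0:Int)))
      = (List.range (s.length+1)).map (fun _ => List.replicate (t.length+1) (0:Int)) := by
    have step : ∀ i x, i < s.length →
        x = (List.range (s.length+1)).map (fun _ => List.replicate (t.length+1) (0:Int)) →
        pvAzeroCol x (i+1)
          = (List.range (s.length+1)).map (fun _ => List.replicate (t.length+1) (0:Int)) := by
      intro i x hi hx
      subst hx
      unfold pvAzeroCol
      rw [getD_map_range _ _ (by omega), List.set_replicate_self, map_range_set]
      exact List.map_congr_left (fun a _ => by simp)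
    exact foldl_inv
      (fun _ x => x = (List.range (s.length+1)).map (fun _ => List.replicate (t.length+1) (0:Int)))
      pvAzeroCol _ s.length step rfl
  -- step 2: the dp[0][j] = j loop builds colRow
  have h2 : (List.range' 1 t.length).foldl pvAtopRow
      ((List.range (s.length+1)).map (fun _ => List.replicate (t.length+1) (0:Int)))
      = (List.range (s.length+1)).map
          (fun i => if i = 0 then colRow t.length t.length else List.replicate (t.length+1) (0:Int)) := by
    have hcol0 : colRow t.length 0 = List.replicate (t.length+1) (0:Int) := by
      unfold colRow
      rw [show (fun j' : Nat => if j' ≤ 0 then (j' : Int) else 0) = (fun _ : Nat => (0:Int)) from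
        funext (fun j' => by cases j' <;> simp), map_range_const]
    have base : (List.range (s.length+1)).map (fun _ => List.replicate (t.length+1) (0:Int))
        = (List.range (s.length+1)).map
            (fun i => if i = 0 then colRow t.length 0 else List.replicate (t.length+1) (0:Int)) := by
      apply List.map_congr_left
      intro a _
      by_cases ha : a = 0 <;> simp [ha, hcol0]
    have step : ∀ j x, j < t.length →
        x = (List.range (s.length+1)).map
            (fun i => if i = 0 then colRow t.length j else List.replicate (t.length+1) (0:Int)) →
        pvAtopRow x (j+1)
          = (List.range (s.length+1)).map
              (fun i => if i = 0 then colRow t.length (j+1) else List.replicate (t.length+1) (0:Int)) := by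
      intro j x hj hx
      subst hx
      unfold pvAtopRow
      have e0 : ((List.range (s.length+1)).map
            (fun i => if i = 0 then colRow t.length j else List.replicate (t.length+1) (0:Int))).getD 0
            ([] : List Int) = colRow t.length j := by
        rw [getD_map_range _ _ (show (0:Nat) < s.length+1 by omega)]
        simp
      rw [e0, colRow_set t.length j hj, map_range_set]
      apply List.map_congr_left
      intro a _
      by_cases ha : a = 0 <;> simp [ha]
    exact foldl_inv
      (fun j x => x = (List.range (s.length+1)).map
          (fun i => if i = 0 then colRow t.length j else List.replicate (t.length+1) (0:Int)))
      pvAtopRow _ t.length step base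
  rw [h1, h2]
  -- bridge: row 0 is complete
  have hbridge : (List.range (s.length+1)).map
        (fun i => if i = 0 then colRow t.length t.length else List.replicate (t.length+1) (0:Int))
      = (List.range (s.length+1)).map
          (fun i' => if i' ≤ 0 then rowD s t i' else List.replicate (t.length+1) (0:Int)) := by
    have hcolm : colRow t.length t.length = rowD s t 0 := by
      unfold colRow rowD
      apply List.map_congr_left
      intro a ha
      rw [List.mem_range] at ha
      rw [if_pos (by omega)]
      cases a with
      | zero => simp [pvBf_zero_right]
      | succ k => rw [pvBf_zero_left]; push_cast; ring
    apply List.map_congr_left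
    intro a _
    by_cases ha : a = 0
    · subst ha; simp [hcolm]
    · rw [if_neg ha, if_neg (by omega)]
  rw [hbridge]
  -- main double loop
  have main : ∀ i x, i < s.length →
      x = (List.range (s.length+1)).map
          (fun i' => if i' ≤ i then rowD s t i' else List.replicate (t.length+1) (0:Int)) →
      pvArow s t x (i+1)
        = (List.range (s.length+1)).map
            (fun i' => if i' ≤ i+1 then rowD s t i' else List.replicate (t.length+1) (0:Int)) := by
    intro i x hi hx
    subst hx
    unfold pvArow
    have qbase : (List.range (s.length+1)).map
          (fun i' => if i' ≤ i then rowD s t i' else List.replicate (t.length+1) (0:Int))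
        = (List.range (s.length+1)).map
            (fun i' => if i' ≤ i then rowD s t i'
              else if i' = i+1 then partRow s t (i+1) 0 else List.replicate (t.length+1) (0:Int)) := by
      apply List.map_congr_left
      intro a _
      by_cases h1 : a ≤ i
      · simp [h1]
      · rw [if_neg h1, if_neg h1]
        by_cases h2 : a = i+1 <;> simp [h2, partRow_zero]
    have qstep : ∀ j y, j < t.length →
        y = (List.range (s.length+1)).map
            (fun i' => if i' ≤ i then rowD s t i'
              else if i' = i+1 then partRow s t (i+1) j else List.replicate (t.length+1) (0:Int)) →
        pvAcell s t y (i+1) (j+1)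
          = (List.range (s.length+1)).map
              (fun i' => if i' ≤ i then rowD s t i'
                else if i' = i+1 then partRow s t (i+1) (j+1) else List.replicate (t.length+1) (0:Int)) := by
      intro j y hj hy
      subst hy
      unfold pvAcell
      simp only [Nat.add_sub_cancel]
      have eI : ((List.range (s.length+1)).map
            (fun i' => if i' ≤ i then rowD s t i'
              else if i' = i+1 then partRow s t (i+1) j else List.replicate (t.length+1) (0:Int))).getD i
            ([] : List Int) = rowD s t i := by
        rw [getD_map_range _ _ (show i < s.length+1 by omega)]
        simp
      have eI1 : ((List.range (s.length+1)).map
            (fun i' => if i' ≤ i then rowD s t i'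
              else if i' = i+1 then partRow s t (i+1) j else List.replicate (t.length+1) (0:Int))).getD (i+1)
            ([] : List Int) = partRow s t (i+1) j := by
        rw [getD_map_range _ _ (show i+1 < s.length+1 by omega)]
        simp only []
        rw [if_neg (by omega : ¬ (i+1 ≤ i))]
        simp
      rw [eI, eI1, rowD_getD s t i (j+1) (by omega), rowD_getD s t i j (by omega),
        partRow_getD s t (i+1) j j (le_refl j) (by omega), ← pvBf_succ s t i j,
        partRow_set s t (i+1) j hj, map_range_set]
      apply List.map_congr_left
      intro a _
      by_cases h1 : a = i+1
      · subst h1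
        rw [if_pos rfl, if_neg (by omega : ¬ i+1 ≤ i), if_pos rfl]
      · rw [if_neg h1]
        by_cases h2 : a ≤ i
        · simp [h2]
        · rw [if_neg h2, if_neg h2, if_neg h1, if_neg h1]
    have qend := foldl_inv
      (fun j y => y = (List.range (s.length+1)).map
          (fun i' => if i' ≤ i then rowD s t i'
            else if i' = i+1 then partRow s t (i+1) j else List.replicate (t.length+1) (0:Int)))
      (fun dp j => pvAcell s t dp (i+1) j) _ t.length qstep qbase
    rw [qend]
    apply List.map_congr_left
    intro a _
    rw [partRow_full]
    by_cases h1 : a ≤ i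
    · rw [if_pos h1, if_pos (by omega)]
    · by_cases h2 : a = i+1
      · subst h2
        rw [if_neg h1, if_pos rfl, if_pos (le_refl _)]
      · rw [if_neg h1, if_neg h2, if_neg (by omega)]
  have hmain := foldl_inv
    (fun i x => x = (List.range (s.length+1)).map
        (fun i' => if i' ≤ i then rowD s t i' else List.replicate (t.length+1) (0:Int)))
    (fun dp i => pvArow s t dp i) _ s.length main rfl
  rw [hmain]
  apply List.map_congr_left
  intro a ha
  rw [List.mem_range] at ha
  rw [if_pos (by omega)]

theorem ports_eq (source target : String) :
    generalized_levenshtein_distance source target = generalized_levenshtein_distance_alt source target := by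
  unfold generalized_levenshtein_distance generalized_levenshtein_distance_alt
  by_cases h : target.toList.length > source.toList.length
  · rw [if_pos h, if_pos h]
  · rw [if_neg h, if_neg h, A_table]
    congr 1
    apply List.map_congr_left
    intro i hi
    rw [List.mem_range'_1] at hi
    rw [getD_map_range _ _ (by omega), rowD, getD_map_range _ _ (Nat.lt_succ_self _)]

-- ===== VERDICT (by name: the statement is the Claim_ definition above) =====
theorem generalized_levenshtein_distance_spec : Claim_equal_generalized_levenshtein_distance := by
  intro source target _ _
  unfold Spec_generalized_levenshtein_distance
  exact ports_eq source target
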